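-- pv_equiv track=rewrite | github.com/hattum/ijwit | Miro/priority_miro_org.py | potentials
-- ===== SOURCE A (Python) =====
-- def potentials(eiwit, depth): #nieuw
--     hpotentials = {}
--     for i in range(depth):
--         hpotentials[i] = 0
--         for j in range(i, depth):
--             if eiwit[j] == "H":
--                 hpotentials[i] +=1
--     return hpotentials
-- ===== SOURCE B (Python) =====
-- def potentials(eiwit, depth):
--     n = depth if depth > 0 else 0
--     counts = []
--     acc = 0
--     for ch in reversed(eiwit[:n]):
--         if ch == "H":
--             acc += 1
--         counts.append(acc)
--     counts.reverse()
--     return {i: counts[i] for i in range(n)}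
-- ===== Notes on version B (the rewrite author's own statement) =====
-- stated objective: faster
-- what changed: Replaced the nested loop (recounting the suffix for every start index, O(depth^2)) by one backward pass that accumulates a running suffix count of 'H' and then emits {i: suffix_count[i]}.
import Mathlib
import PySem

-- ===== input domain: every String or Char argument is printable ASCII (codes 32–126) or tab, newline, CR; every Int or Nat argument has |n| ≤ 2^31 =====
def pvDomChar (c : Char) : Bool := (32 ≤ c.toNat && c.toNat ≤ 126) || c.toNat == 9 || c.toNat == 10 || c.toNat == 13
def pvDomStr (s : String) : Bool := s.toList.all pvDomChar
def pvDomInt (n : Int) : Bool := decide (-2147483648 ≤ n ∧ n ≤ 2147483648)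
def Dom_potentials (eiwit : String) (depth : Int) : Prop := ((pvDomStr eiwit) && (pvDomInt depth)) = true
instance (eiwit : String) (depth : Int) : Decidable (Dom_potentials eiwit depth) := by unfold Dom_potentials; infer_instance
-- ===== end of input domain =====

-- B replaces A's nested recount of every suffix by a single backward pass keeping a
-- running suffix count of 'H' (measured faster on the generated inputs; see claim).

-- ===== PORT A =====
def potentials (eiwit : String) (depth : Int) : List (Int × Int) :=
  ((PySem.List.pyRange 0 depth 1).foldl (fun d i =>
      (PySem.List.pyRange i depth 1).foldl
        (fun d j => if PySem.Str.pyGet? eiwit j = some 'H' then PySem.Dict.modify d i 0 (· + 1) else d)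
        (PySem.Dict.insert d i 0))
    PySem.Dict.empty).items

-- ===== PORT B =====
def potentials_alt (eiwit : String) (depth : Int) : List (Int × Int) :=
  let n : Int := if 0 < depth then depth else 0
  let p := ((PySem.Str.slice eiwit none (some n)).toList.reverse).foldl
      (fun (st : Int × List Int) ch =>
        let acc := if ch = 'H' then st.1 + 1 else st.1
        (acc, st.2 ++ [acc])) ((0 : Int), ([] : List Int))
  let counts := p.2.reverse
  (PySem.List.pyRange 0 n 1).map (fun i => (i, PySem.List.pyGetD counts i 0))

-- ===== PRECONDITION & SPEC =====
-- A raises IndexError exactly when depth exceeds len(eiwit); those inputs are excluded.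
def Pre_potentials (eiwit : String) (depth : Int) : Prop := depth ≤ (eiwit.toList.length : Int)
instance (eiwit : String) (depth : Int) : Decidable (Pre_potentials eiwit depth) := by unfold Pre_potentials; infer_instance
def pvWitness_potentials : String × Int := ("HXH", 2)

def Spec_potentials (eiwit : String) (depth : Int) (out : List (Int × Int)) : Prop := out = potentials_alt eiwit depth
instance (eiwit : String) (depth : Int) (out : List (Int × Int)) : Decidable (Spec_potentials eiwit depth out) := by unfold Spec_potentials; infer_instance

-- ===== CLAIM (what is proved, stated in full; the proofs are below) =====
def Claim_equal_potentials : Prop := ∀ (eiwit : String) (depth : Int), Dom_potentials eiwit depth → Pre_potentials eiwit depth → Spec_potentials eiwit depth (potentials eiwit depth)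

-- ===== LEMMAS AND PROOFS =====

-- the common normal form: the value at index k is the 'H'-count of eiwit[k:N]
def pvSfx (cs : List Char) (N k : Nat) : Nat := ((cs.take N).drop k).count 'H'

-- A's inner loop over a fixed key i turns the dict entry (i, v) into (i, v + count)
theorem pv_inner_fold (l : List Int) (d : PySem.Dict Int Int) (i v : Int) (P : Int → Prop) [DecidablePred P] :
    l.foldl (fun d j => if P j then PySem.Dict.modify d i 0 (· + 1) else d) (d.insert i v)
      = d.insert i (v + (l.countP (fun j => decide (P j)) : Int)) := by
  induction l generalizing v with
  | nil => simp
  | cons h t ih =>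
    simp only [List.foldl_cons, List.countP_cons]
    by_cases hp : P h
    · simp only [hp, if_pos]
      rw [show PySem.Dict.modify (d.insert i v) i 0 (· + 1) = d.insert i (v + 1) by
        simp [PySem.Dict.modify, PySem.Dict.getD_insert_self, PySem.Dict.insert_insert_self]]
      rw [ih]
      congr 1
      simp
      omega
    · simp only [hp, if_neg, not_false_iff]
      rw [ih]
      simp

theorem pv_count_range (l : List Char) (c : Char) :
    (List.range l.length).countP (fun m => l[m]? == some c) = l.count c := by
  induction l with
  | nil => simp
  | cons h t ih =>
    rw [List.length_cons, List.range_succ_eq_map, List.countP_cons, List.countP_map]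
    simp only [List.getElem?_cons_zero, Function.comp_def, List.getElem?_cons_succ]
    rw [ih, List.count_cons]
    simp

theorem pv_cnt_eq (cs : List Char) (N k : Nat) (hk : k ≤ N) (hN : N ≤ cs.length) :
    (List.range (N - k)).countP (fun m => decide (cs[k + m]? = some 'H')) = pvSfx cs N k := by
  have hlen : ((cs.take N).drop k).length = N - k := by
    simp [List.length_drop, List.length_take]; omega
  unfold pvSfx
  rw [← pv_count_range ((cs.take N).drop k) 'H', hlen]
  apply List.countP_congr
  intro m hm
  rw [List.mem_range] at hm
  rw [List.getElem?_drop, List.getElem?_take_of_lt (by omega)]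
  simp

theorem pv_a_items (eiwit : String) (depth : Int) :
    potentials eiwit depth
      = (PySem.List.pyRange 0 depth 1).map (fun i =>
          (i, (0 : Int) + ((PySem.List.pyRange i depth 1).countP
                (fun j => decide (PySem.Str.pyGet? eiwit j = some 'H')) : Int))) := by
  unfold potentials
  have h1 := PySem.List.foldl_congr_mem
      (l := PySem.List.pyRange 0 depth 1)
      (init := (PySem.Dict.empty : PySem.Dict Int Int))
      (f := fun d i =>
        (PySem.List.pyRange i depth 1).foldl
          (fun d j => if PySem.Str.pyGet? eiwit j = some 'H' then PySem.Dict.modify d i 0 (· + 1) else d)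
          (PySem.Dict.insert d i 0))
      (g := fun d i =>
        PySem.Dict.insert d i ((0 : Int) + ((PySem.List.pyRange i depth 1).countP
          (fun j => decide (PySem.Str.pyGet? eiwit j = some 'H')) : Int)))
      (by intro acc x hx; exact pv_inner_fold _ _ _ _ _)
  rw [h1]
  have h2 := PySem.Dict.items_foldl_insert_fresh
      (l := PySem.List.pyRange 0 depth 1) (k := fun (i : Int) => i)
      (v := fun i => (0 : Int) + ((PySem.List.pyRange i depth 1).countP
          (fun j => decide (PySem.Str.pyGet? eiwit j = some 'H')) : Int))
      (d := PySem.Dict.empty)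
      (by intro a _; exact PySem.Dict.contains_empty a)
      (by simpa using PySem.List.nodup_pyRange_one 0 depth)
  simp only at h2
  rw [h2]
  rfl

theorem pv_a_norm (eiwit : String) (depth : Int)
    (hN : depth.toNat ≤ eiwit.toList.length) :
    potentials eiwit depth
      = (List.range depth.toNat).map
          (fun (k : Nat) => ((k : Int), (pvSfx eiwit.toList depth.toNat k : Int))) := by
  set cs := eiwit.toList with hcs
  set N := depth.toNat with hNdef
  rw [pv_a_items, PySem.List.pyRange_one, List.map_map]
  simp only [sub_zero, ← hNdef]
  apply List.map_congr_left
  intro k hk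
  rw [List.mem_range] at hk
  simp only [Function.comp_def, zero_add]
  congr 1
  rw [PySem.List.pyRange_one, List.countP_map]
  have hM : (depth - (k : Int)).toNat = N - k := by omega
  rw [hM]
  simp only [Function.comp_def]
  have hP : ∀ m ∈ List.range (N - k),
      (fun (m : Nat) => decide (PySem.Str.pyGet? eiwit ((k : Int) + (m : Int)) = some 'H')) m = true
        ↔ (fun (m : Nat) => decide (cs[k + m]? = some 'H')) m = true := by
    intro m hm
    simp only
    have hc : ((k : Int) + (m : Int)) = ((k + m : Nat) : Int) := by push_cast; ring
    rw [hc, PySem.Str.pyGet?_natCast]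
  rw [List.countP_congr hP, pv_cnt_eq cs N k (by omega) hN]

theorem pv_fold_b (t : List Char) (a : Int) (p : List Int) :
    t.foldl (fun (st : Int × List Int) ch =>
        let acc := if ch = 'H' then st.1 + 1 else st.1
        (acc, st.2 ++ [acc])) (a, p)
      = (a + (t.count 'H' : Int),
         p ++ (List.range t.length).map (fun k => a + ((t.take (k+1)).count 'H' : Int))) := by
  induction t generalizing a p with
  | nil => simp
  | cons h t ih =>
    simp only [List.foldl_cons]
    rw [ih]
    rw [List.length_cons, List.range_succ_eq_map]
    simp only [List.map_cons, List.map_map, Function.comp_def, List.take_succ_cons, List.count_cons]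
    by_cases hh : h = 'H'
    · simp [hh]
      refine ⟨by ring, fun k _ => by ring⟩
    · simp [hh, Nat.succ_eq_add_one]

theorem pv_b_norm (eiwit : String) (depth : Int)
    (hN : depth.toNat ≤ eiwit.toList.length) :
    potentials_alt eiwit depth
      = (List.range depth.toNat).map
          (fun (k : Nat) => ((k : Int), (pvSfx eiwit.toList depth.toNat k : Int))) := by
  unfold potentials_alt
  set cs := eiwit.toList with hcs
  set N := depth.toNat with hNdef
  have hn : (if (0:Int) < depth then depth else 0) = (N : Int) := by
    split_ifs with h <;> omega
  rw [hn]
  have hslice : (PySem.Str.slice eiwit none (some (N : Int))).toList = cs.take N := by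
    rw [PySem.Str.toList_slice, PySem.Chars.slice_eq_listSlice,
        PySem.List.slice_to _ (by positivity)]
    rfl
  have hlen : (cs.take N).length = N := by simp [List.length_take]; omega
  simp only [hslice, pv_fold_b, List.length_reverse, hlen, List.nil_append]
  rw [PySem.List.pyRange_zero_nat, List.map_map]
  apply List.map_congr_left
  intro k hk
  rw [List.mem_range] at hk
  simp only [Function.comp_def]
  have hget : PySem.List.pyGetD
      (((List.range N).map (fun j => (0 : Int) + (((cs.take N).reverse.take (j+1)).count 'H' : Int))).reverse)
      ((k : Int)) 0
      = (pvSfx cs N k : Int) := by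
    rw [PySem.List.pyGetD_natCast]
    rw [List.getD_eq_getElem _ _ (by simp; omega)]
    rw [List.getElem_reverse]
    simp only [List.length_map, List.length_range, List.getElem_map, List.getElem_range]
    have ht : (cs.take N).reverse.take (N - 1 - k + 1) = ((cs.take N).drop k).reverse := by
      rw [List.take_reverse]
      congr 1
      congr 1
      rw [hlen]
      omega
    rw [ht]
    unfold pvSfx
    simp
  rw [hget]

-- ===== VERDICT (by name: the statement is the Claim_ definition above) =====
theorem potentials_spec : Claim_equal_potentials := by
  intro eiwit depth _ hpre
  unfold Pre_potentials at hpre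
  unfold Spec_potentials
  have hN : depth.toNat ≤ eiwit.toList.length := by omega
  rw [pv_a_norm eiwit depth hN, pv_b_norm eiwit depth hN]
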